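-- pv_equiv track=rewrite | github.com/robert12qw/flaga | piaskownica/powtorka.py | policz_domeny_pl
-- ===== SOURCE A (Python) =====
-- def policz_domeny_pl(lista):
--     licz=0
--     for i, adres in enumerate(lista):
--         if '.com.pl' in adres:
--            continue
--         elif '.pl' in adres:
--             licz += 1
--     return licz
-- ===== SOURCE B (Python) =====
-- def policz_domeny_pl(lista):
--     total = sum(1 for adres in lista if '.pl' in adres)
--     exclude = sum(1 for adres in lista if '.com.pl' in adres)
--     return total - exclude
-- ===== Notes on version B (the rewrite author's own statement) =====
-- stated objective: alternative
-- what changed: Replaces the single exclusive if/continue-elif branch loop with two independent membership counts (all '.pl' matches minus all '.com.pl' matches); equal because '.pl' occurs in every string containing '.com.pl'.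
import Mathlib
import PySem

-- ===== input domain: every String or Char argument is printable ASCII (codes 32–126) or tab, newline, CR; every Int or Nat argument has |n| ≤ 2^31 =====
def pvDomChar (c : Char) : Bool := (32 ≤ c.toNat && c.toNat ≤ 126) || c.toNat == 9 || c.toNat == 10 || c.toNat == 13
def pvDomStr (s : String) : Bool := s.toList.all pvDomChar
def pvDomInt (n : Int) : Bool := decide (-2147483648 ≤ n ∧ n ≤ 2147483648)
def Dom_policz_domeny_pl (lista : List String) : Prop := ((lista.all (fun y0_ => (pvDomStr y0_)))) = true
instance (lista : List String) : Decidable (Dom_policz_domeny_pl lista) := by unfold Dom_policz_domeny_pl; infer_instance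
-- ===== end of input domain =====

-- B: two independent membership counts (total '.pl' minus '.com.pl') instead of A's exclusive branch loop; alternative decomposition, same cost.
-- ===== PORT A =====
def policz_domeny_pl (lista : List String) : Int :=
  (PySem.List.enumerate lista).foldl
    (fun licz p =>
      if PySem.Str.isIn ".com.pl" p.2 then licz
      else if PySem.Str.isIn ".pl" p.2 then licz + 1
      else licz) 0

-- ===== PORT B =====
def policz_domeny_pl_alt (lista : List String) : Int :=
  ((lista.filter (fun adres => PySem.Str.isIn ".pl" adres)).map (fun _ => (1 : Int))).sum
  - ((lista.filter (fun adres => PySem.Str.isIn ".com.pl" adres)).map (fun _ => (1 : Int))).sum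

-- ===== PRECONDITION & SPEC =====
def Spec_policz_domeny_pl (lista : List String) (out : Int) : Prop := out = policz_domeny_pl_alt lista
instance (lista : List String) (out : Int) : Decidable (Spec_policz_domeny_pl lista out) := by unfold Spec_policz_domeny_pl; infer_instance

-- ===== CLAIM (what is proved, stated in full; the proofs are below) =====
def Claim_equal_policz_domeny_pl : Prop := ∀ (lista : List String), Dom_policz_domeny_pl lista → Spec_policz_domeny_pl lista (policz_domeny_pl lista)

-- ===== LEMMAS AND PROOFS =====

-- ===== VERDICT (by name: the statement is the Claim_ definition above) =====
-- '.com.pl' in s implies '.pl' in s (suffix containment)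
theorem compl_imp_pl (s : String) (h : PySem.Str.isIn ".com.pl" s = true) :
    PySem.Str.isIn ".pl" s = true := by
  rw [PySem.Str.isIn_iff_infix] at h ⊢
  exact List.IsInfix.trans (by decide) h

theorem step_eq (lista : List String) (k : Int) (c : Int) :
    (PySem.List.enumerate lista k).foldl
      (fun licz p =>
        if PySem.Str.isIn ".com.pl" p.2 then licz
        else if PySem.Str.isIn ".pl" p.2 then licz + 1
        else licz) c
    = c + ((lista.filter (fun a => PySem.Str.isIn ".pl" a)).map (fun _ => (1 : Int))).sum
        - ((lista.filter (fun a => PySem.Str.isIn ".com.pl" a)).map (fun _ => (1 : Int))).sum := by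
  induction lista generalizing k c with
  | nil => simp [PySem.List.enumerate_nil]
  | cons a t ih =>
    simp only [PySem.List.enumerate_cons, List.foldl_cons, List.filter_cons]
    by_cases hc : PySem.Str.isIn ".com.pl" a = true
    · have hp := compl_imp_pl a hc
      simp only [hc, if_true, hp, List.map_cons, List.sum_cons, ih]; ring
    · by_cases hp : PySem.Str.isIn ".pl" a = true
      · simp only [hc, if_false, Bool.false_eq_true, ite_false, hp, ite_true,
          List.map_cons, List.sum_cons, ih]; ring
      · simp only [hc, hp, Bool.false_eq_true, ite_false, ih]

theorem policz_domeny_pl_spec : Claim_equal_policz_domeny_pl := by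
  intro lista _
  unfold Spec_policz_domeny_pl policz_domeny_pl policz_domeny_pl_alt
  rw [step_eq]
  ring
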